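-- pv_equiv track=rewrite | github.com/somansh333/AdCraft-Pro | ad_insights_scraper/scrapers/reddit_scraper.py | _suggest_visual_focus
-- ===== SOURCE A (Python) =====
-- from typing import List, Dict, Optional, Any, Tuple, Union
--
-- def _suggest_visual_focus(
--
--     product: str,
--     brand: str,
--     key_elements: Dict[str, Any]
-- ) -> str:
--     """
--     Suggest visual focus for the ad based on data.
--
--     Args:
--         product: Product name
--         brand: Brand name
--         key_elements: Dictionary with key ad elements
--
--     Returns:
--         Visual focus suggestion
--     """
--     # Get product type
--     product_lower = product.lower()
--
--     # Product-specific suggestions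
--     if any(tech in product_lower for tech in ['phone', 'iphone', 'smartphone']):
--         return "phone screen and innovative features"
--
--     elif any(term in product_lower for term in ['laptop', 'computer', 'pc', 'macbook']):
--         return "sleek design and screen display"
--
--     elif any(term in product_lower for term in ['car', 'vehicle', 'auto']):
--         return "dramatic vehicle angle with lighting emphasis"
--
--     elif any(term in product_lower for term in ['shoe', 'sneaker', 'footwear']):
--         return "shoe profile with texture details"
--
--     elif any(term in product_lower for term in ['watch', 'timepiece']):
--         return "watch face and craftsmanship details"
--
--     elif any(term in product_lower for term in ['skincare', 'cream', 'lotion']):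
--         return "product texture and elegant packaging"
--
--     # Use key elements for generic recommendations
--     dominant_styles = key_elements.get('dominant_styles', [])
--
--     if 'minimalist' in dominant_styles:
--         return "clean product showcase with minimal styling"
--     elif 'detailed' in dominant_styles:
--         return "product details and feature highlights"
--     elif 'lifestyle' in dominant_styles:
--         return "product in lifestyle context"
--     elif 'technical' in dominant_styles:
--         return "technical features and performance elements"
--     elif 'emotional' in dominant_styles:
--         return "emotional benefits of product usage"
--
--     # Default focus
--     return "product with professional lighting and staging"
-- ===== SOURCE B (Python) =====
-- # B: instead of an ordered early-return chain, do a full scan of a flat keyword->tier-rank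
-- # map and return the suggestion of the MINIMUM matched rank; the style pass iterates the
-- # input dominant_styles (not a table), taking the minimum style rank found.
-- _KW_RANK = {
--     'phone': 0, 'iphone': 0, 'smartphone': 0,
--     'laptop': 1, 'computer': 1, 'pc': 1, 'macbook': 1,
--     'car': 2, 'vehicle': 2, 'auto': 2,
--     'shoe': 3, 'sneaker': 3, 'footwear': 3,
--     'watch': 4, 'timepiece': 4,
--     'skincare': 5, 'cream': 5, 'lotion': 5,
-- }
-- _PRODUCT_SUGG = [
--     "phone screen and innovative features",
--     "sleek design and screen display",
--     "dramatic vehicle angle with lighting emphasis",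
--     "shoe profile with texture details",
--     "watch face and craftsmanship details",
--     "product texture and elegant packaging",
-- ]
-- _STYLE_RANK = {'minimalist': 0, 'detailed': 1, 'lifestyle': 2, 'technical': 3, 'emotional': 4}
-- _STYLE_SUGG = [
--     "clean product showcase with minimal styling",
--     "product details and feature highlights",
--     "product in lifestyle context",
--     "technical features and performance elements",
--     "emotional benefits of product usage",
-- ]
--
-- def _suggest_visual_focus(product, brand, key_elements):
--     product_lower = product.lower()
--     best = min((r for kw, r in _KW_RANK.items() if kw in product_lower), default=None)
--     if best is not None:
--         return _PRODUCT_SUGG[best]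
--     best = min((_STYLE_RANK[s] for s in key_elements.get('dominant_styles', []) if s in _STYLE_RANK), default=None)
--     if best is not None:
--         return _STYLE_SUGG[best]
--     return "product with professional lighting and staging"
-- ===== Notes on version B (the rewrite author's own statement) =====
-- stated objective: alternative
-- what changed: Replaced the ordered early-return if/elif chain by a full scan over a flat keyword-to-tier-rank map that returns the suggestion of the minimum matched rank, and a style pass that iterates the input dominant_styles with a rank lookup instead of scanning a style table.
import Mathlib
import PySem

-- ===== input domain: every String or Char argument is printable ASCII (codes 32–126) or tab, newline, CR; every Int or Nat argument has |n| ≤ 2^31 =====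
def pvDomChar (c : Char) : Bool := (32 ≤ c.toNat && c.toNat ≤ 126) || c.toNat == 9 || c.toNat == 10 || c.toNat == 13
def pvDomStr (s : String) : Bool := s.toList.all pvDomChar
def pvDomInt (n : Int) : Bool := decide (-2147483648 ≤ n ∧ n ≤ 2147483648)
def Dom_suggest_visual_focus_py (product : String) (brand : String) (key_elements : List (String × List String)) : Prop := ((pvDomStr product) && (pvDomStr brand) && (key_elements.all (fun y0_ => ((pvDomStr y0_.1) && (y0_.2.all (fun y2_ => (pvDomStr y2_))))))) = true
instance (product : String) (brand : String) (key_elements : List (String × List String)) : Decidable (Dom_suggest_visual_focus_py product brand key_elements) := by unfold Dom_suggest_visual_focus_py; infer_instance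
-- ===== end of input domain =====

-- B replaces A's ordered early-return if/elif chain by a full scan over a flat keyword→tier-rank map,
-- returning the suggestion of the minimum matched rank; the style pass iterates the input
-- dominant_styles with a rank lookup instead of scanning a style table (alternative; same cost).


-- ===== PORT A =====
-- Port of A: the original if/elif chain, literally.
def suggest_visual_focus_py (product : String) (brand : String) (key_elements : List (String × List String)) : String :=
  let product_lower := PySem.Str.lower product
  if ["phone", "iphone", "smartphone"].any (fun tech => PySem.Str.isIn tech product_lower) then
    "phone screen and innovative features"
  else if ["laptop", "computer", "pc", "macbook"].any (fun term => PySem.Str.isIn term product_lower) then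
    "sleek design and screen display"
  else if ["car", "vehicle", "auto"].any (fun term => PySem.Str.isIn term product_lower) then
    "dramatic vehicle angle with lighting emphasis"
  else if ["shoe", "sneaker", "footwear"].any (fun term => PySem.Str.isIn term product_lower) then
    "shoe profile with texture details"
  else if ["watch", "timepiece"].any (fun term => PySem.Str.isIn term product_lower) then
    "watch face and craftsmanship details"
  else if ["skincare", "cream", "lotion"].any (fun term => PySem.Str.isIn term product_lower) then
    "product texture and elegant packaging"
  else
    let dominant_styles := PySem.Dict.getD ⟨key_elements⟩ "dominant_styles" []
    if dominant_styles.contains "minimalist" then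
      "clean product showcase with minimal styling"
    else if dominant_styles.contains "detailed" then
      "product details and feature highlights"
    else if dominant_styles.contains "lifestyle" then
      "product in lifestyle context"
    else if dominant_styles.contains "technical" then
      "technical features and performance elements"
    else if dominant_styles.contains "emotional" then
      "emotional benefits of product usage"
    else
      "product with professional lighting and staging"

-- ===== PORT B =====
-- B (Source B): flat keyword→rank map, full min-rank scan; style pass iterates the input styles.
def pvKwRank : List (String × Nat) :=
  [("phone", 0), ("iphone", 0), ("smartphone", 0),
   ("laptop", 1), ("computer", 1), ("pc", 1), ("macbook", 1),
   ("car", 2), ("vehicle", 2), ("auto", 2),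
   ("shoe", 3), ("sneaker", 3), ("footwear", 3),
   ("watch", 4), ("timepiece", 4),
   ("skincare", 5), ("cream", 5), ("lotion", 5)]

def pvProductSugg : List String :=
  ["phone screen and innovative features",
   "sleek design and screen display",
   "dramatic vehicle angle with lighting emphasis",
   "shoe profile with texture details",
   "watch face and craftsmanship details",
   "product texture and elegant packaging"]

def pvStyleRank : List (String × Nat) :=
  [("minimalist", 0), ("detailed", 1), ("lifestyle", 2), ("technical", 3), ("emotional", 4)]

def pvStyleSugg : List String :=
  ["clean product showcase with minimal styling",
   "product details and feature highlights",
   "product in lifestyle context",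
   "technical features and performance elements",
   "emotional benefits of product usage"]

-- running 'min' accumulator for Python's min(..., default=None)
def pvMinOpt (acc : Option Nat) (r : Nat) : Option Nat :=
  some (match acc with | none => r | some m => min m r)

-- one step of the keyword scan: 'r for kw, r in _KW_RANK.items() if kw in product_lower' fed to min
def pvKwStep (pl : String) (acc : Option Nat) (p : String × Nat) : Option Nat :=
  if PySem.Str.isIn p.1 pl then pvMinOpt acc p.2 else acc

-- one step of the style scan: '_STYLE_RANK[s] for s in ds if s in _STYLE_RANK' fed to min
def pvStyleStep (acc : Option Nat) (s : String) : Option Nat :=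
  match PySem.Dict.get? ⟨pvStyleRank⟩ s with
  | some r => pvMinOpt acc r
  | none => acc

def suggest_visual_focus_py_alt (product : String) (brand : String) (key_elements : List (String × List String)) : String :=
  let product_lower := PySem.Str.lower product
  match pvKwRank.foldl (pvKwStep product_lower) none with
  | some r => pvProductSugg.getD r ""   -- _PRODUCT_SUGG[r]; r < 6 always, so plain list indexing is exact
  | none =>
    match (PySem.Dict.getD ⟨key_elements⟩ "dominant_styles" []).foldl pvStyleStep none with
    | some r => pvStyleSugg.getD r ""   -- _STYLE_SUGG[r]; r < 5 always
    | none => "product with professional lighting and staging"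

-- ===== PRECONDITION & SPEC =====
def Spec_suggest_visual_focus_py (product : String) (brand : String) (key_elements : List (String × List String)) (out : String) : Prop := out = suggest_visual_focus_py_alt product brand key_elements
instance (product : String) (brand : String) (key_elements : List (String × List String)) (out : String) : Decidable (Spec_suggest_visual_focus_py product brand key_elements out) := by unfold Spec_suggest_visual_focus_py; infer_instance

-- ===== CLAIM (what is proved, stated in full; the proofs are below) =====
def Claim_equal_suggest_visual_focus_py : Prop := ∀ (product : String) (brand : String) (key_elements : List (String × List String)), Dom_suggest_visual_focus_py product brand key_elements → Spec_suggest_visual_focus_py product brand key_elements (suggest_visual_focus_py product brand key_elements)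

-- ===== LEMMAS AND PROOFS =====

theorem pvMinOpt_idem (acc : Option Nat) (r : Nat) : pvMinOpt (pvMinOpt acc r) r = pvMinOpt acc r := by
  cases acc <;> simp [pvMinOpt]

-- a constant-rank block of the keyword scan behaves like one 'any' check
theorem pvKwGroup (pl : String) (r : Nat) (ks : List String) (acc : Option Nat) :
    (ks.map (fun k => (k, r))).foldl (pvKwStep pl) acc
      = if ks.any (fun k => PySem.Str.isIn k pl) then pvMinOpt acc r else acc := by
  induction ks generalizing acc with
  | nil => rfl
  | cons k ks ih =>
    simp only [List.map_cons, List.foldl_cons, List.any_cons, pvKwStep]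
    rw [ih]
    by_cases h : PySem.Str.isIn k pl = true
    · by_cases hks : (ks.any fun k => PySem.Str.isIn k pl) = true
      · rw [if_pos h, if_pos hks, pvMinOpt_idem,
            if_pos (by rw [Bool.or_eq_true]; exact Or.inl h)]
      · rw [if_pos h, if_neg hks, if_pos (by rw [Bool.or_eq_true]; exact Or.inl h)]
    · by_cases hks : (ks.any fun k => PySem.Str.isIn k pl) = true
      · rw [if_neg h, if_pos hks, if_pos (by rw [Bool.or_eq_true]; exact Or.inr hks)]
      · rw [if_neg h, if_neg hks,
            if_neg (by rw [Bool.or_eq_true]; rintro (hc | hc); exacts [h hc, hks hc])]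

theorem pvKwRank_groups : pvKwRank
    = (["phone", "iphone", "smartphone"].map (fun k => (k, 0)))
      ++ (["laptop", "computer", "pc", "macbook"].map (fun k => (k, 1)))
      ++ (["car", "vehicle", "auto"].map (fun k => (k, 2)))
      ++ (["shoe", "sneaker", "footwear"].map (fun k => (k, 3)))
      ++ (["watch", "timepiece"].map (fun k => (k, 4)))
      ++ (["skincare", "cream", "lotion"].map (fun k => (k, 5))) := rfl

-- style-rank lookup characterised
theorem pvStyleLookup (s : String) (r : Nat) :
    PySem.Dict.get? ⟨pvStyleRank⟩ s = some r
      ↔ (s = "minimalist" ∧ r = 0) ∨ (s = "detailed" ∧ r = 1) ∨ (s = "lifestyle" ∧ r = 2)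
        ∨ (s = "technical" ∧ r = 3) ∨ (s = "emotional" ∧ r = 4) := by
  simp only [pvStyleRank, PySem.Dict.get?_mk_cons, beq_iff_eq]
  split_ifs <;> simp_all [PySem.Dict.get?, eq_comm]

theorem pvStyleFold_filterMap (ds : List String) (acc : Option Nat) :
    ds.foldl pvStyleStep acc
      = (ds.filterMap (fun s => PySem.Dict.get? ⟨pvStyleRank⟩ s)).foldl pvMinOpt acc := by
  induction ds generalizing acc with
  | nil => rfl
  | cons s ds ih =>
    simp only [List.foldl_cons, List.filterMap_cons, pvStyleStep]
    cases h : PySem.Dict.get? ⟨pvStyleRank⟩ s <;> simp [h, ih]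

theorem pvFoldMin_some (rs : List Nat) (m : Nat) :
    rs.foldl pvMinOpt (some m) = some (rs.foldl min m) := by
  induction rs generalizing m with
  | nil => rfl
  | cons r rs ih => simp [pvMinOpt, ih]

theorem pvFoldMin_min? (rs : List Nat) : rs.foldl pvMinOpt none = rs.min? := by
  cases rs with
  | nil => rfl
  | cons r rs =>
    show (rs.foldl pvMinOpt (pvMinOpt none r)) = _
    rw [show pvMinOpt none r = some r from rfl, pvFoldMin_some]
    simp [List.min?]

theorem pvRanksMem (ds : List String) (r : Nat) :
    r ∈ ds.filterMap (fun s => PySem.Dict.get? ⟨pvStyleRank⟩ s)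
      ↔ (r = 0 ∧ "minimalist" ∈ ds) ∨ (r = 1 ∧ "detailed" ∈ ds) ∨ (r = 2 ∧ "lifestyle" ∈ ds)
        ∨ (r = 3 ∧ "technical" ∈ ds) ∨ (r = 4 ∧ "emotional" ∈ ds) := by
  simp only [List.mem_filterMap, pvStyleLookup]
  constructor
  · rintro ⟨s, hs, (⟨rfl, rfl⟩ | ⟨rfl, rfl⟩ | ⟨rfl, rfl⟩ | ⟨rfl, rfl⟩ | ⟨rfl, rfl⟩)⟩ <;> tauto
  · rintro (⟨rfl, h⟩ | ⟨rfl, h⟩ | ⟨rfl, h⟩ | ⟨rfl, h⟩ | ⟨rfl, h⟩) <;> exact ⟨_, h, by tauto⟩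

theorem pvMin?_eq_some_of (xs : List Nat) (a : Nat) (ha : a ∈ xs) (hle : ∀ b ∈ xs, a ≤ b) :
    xs.min? = some a := by
  rw [List.min?_eq_some_iff]; exact ⟨ha, hle⟩

-- the style pass of B equals A's contains-chain
theorem pvStyleEq (ds : List String) :
    (match ds.foldl pvStyleStep none with
     | some r => pvStyleSugg.getD r ""
     | none => "product with professional lighting and staging")
    = (if ds.contains "minimalist" then "clean product showcase with minimal styling"
       else if ds.contains "detailed" then "product details and feature highlights"
       else if ds.contains "lifestyle" then "product in lifestyle context"
       else if ds.contains "technical" then "technical features and performance elements"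
       else if ds.contains "emotional" then "emotional benefits of product usage"
       else "product with professional lighting and staging") := by
  rw [pvStyleFold_filterMap, pvFoldMin_min?]
  by_cases h0 : "minimalist" ∈ ds
  · rw [pvMin?_eq_some_of _ 0 ((pvRanksMem ds 0).mpr (by tauto))
        (fun b hb => by omega)]
    simp [h0, pvStyleSugg]
  · by_cases h1 : "detailed" ∈ ds
    · rw [pvMin?_eq_some_of _ 1 ((pvRanksMem ds 1).mpr (by tauto))
          (fun b hb => by rcases (pvRanksMem ds b).mp hb with ⟨rfl, h⟩ | h <;> [exact absurd h h0; omega])]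
      simp [h0, h1, pvStyleSugg]
    · by_cases h2 : "lifestyle" ∈ ds
      · rw [pvMin?_eq_some_of _ 2 ((pvRanksMem ds 2).mpr (by tauto))
            (fun b hb => by rcases (pvRanksMem ds b).mp hb with ⟨rfl, h⟩ | ⟨rfl, h⟩ | h
                            · exact absurd h h0
                            · exact absurd h h1
                            · omega)]
        simp [h0, h1, h2, pvStyleSugg]
      · by_cases h3 : "technical" ∈ ds
        · rw [pvMin?_eq_some_of _ 3 ((pvRanksMem ds 3).mpr (by tauto))
              (fun b hb => by rcases (pvRanksMem ds b).mp hb with ⟨rfl, h⟩ | ⟨rfl, h⟩ | ⟨rfl, h⟩ | h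
                              · exact absurd h h0
                              · exact absurd h h1
                              · exact absurd h h2
                              · omega)]
          simp [h0, h1, h2, h3, pvStyleSugg]
        · by_cases h4 : "emotional" ∈ ds
          · rw [pvMin?_eq_some_of _ 4 ((pvRanksMem ds 4).mpr (by tauto))
                (fun b hb => by rcases (pvRanksMem ds b).mp hb with ⟨rfl, h⟩ | ⟨rfl, h⟩ | ⟨rfl, h⟩ | ⟨rfl, h⟩ | ⟨rfl, h⟩
                                · exact absurd h h0
                                · exact absurd h h1
                                · exact absurd h h2
                                · exact absurd h h3
                                · omega)]
            simp [h0, h1, h2, h3, h4, pvStyleSugg]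
          · have hnil : ds.filterMap (fun s => PySem.Dict.get? ⟨pvStyleRank⟩ s) = [] := by
              rw [List.eq_nil_iff_forall_not_mem]
              intro r hr
              rcases (pvRanksMem ds r).mp hr with ⟨_, h⟩ | ⟨_, h⟩ | ⟨_, h⟩ | ⟨_, h⟩ | ⟨_, h⟩ <;> tauto
            rw [hnil]
            simp [h0, h1, h2, h3, h4]

-- ===== VERDICT (by name: the statement is the Claim_ definition above) =====
set_option maxHeartbeats 1000000 in
theorem suggest_visual_focus_py_spec : Claim_equal_suggest_visual_focus_py := by
  intro product brand key_elements _
  unfold Spec_suggest_visual_focus_py suggest_visual_focus_py suggest_visual_focus_py_alt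
  rw [pvKwRank_groups]
  simp only [List.foldl_append, pvKwGroup, pvStyleEq]
  split_ifs <;> rfl
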